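-- pv_equiv track=rewrite | github.com/axalix/python_ideas | task_2/prefixes_aggregator.py | _shared_prefix_words
-- ===== SOURCE A (Python) =====
-- def _shared_prefix_words(str1, str2):
--     space_idx = 0
--     s1 = min(str1, str2)
--     s2 = max(str1, str2)
--
--     for i, c in enumerate(s1):
--         if c.isspace():
--             space_idx = i
--         if c != s2[i]:
--             return s1[:space_idx].rstrip()
--
--     if s1 == s2 or s2[len(s1)].isspace():
--         return s1.rstrip()
--     else:
--         return s1[:space_idx].rstrip()
-- ===== SOURCE B (Python) =====
-- def _shared_prefix_words(str1, str2):
--     a, b = (str1, str2) if str1 <= str2 else (str2, str1)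
--     # phase 1: longest common character prefix length
--     n = 0
--     while n < len(a) and n < len(b) and a[n] == b[n]:
--         n += 1
--     # phase 2: decide the word boundary
--     if n == len(a) and (n == len(b) or b[n].isspace()):
--         return a.rstrip()
--     # backward scan for the last whitespace among the first min(n+1, len(a)) chars
--     k = min(n + 1, len(a))
--     while k > 0 and not a[k - 1].isspace():
--         k -= 1
--     return a[:k - 1].rstrip() if k > 0 else ''
-- ===== Notes on version B (the rewrite author's own statement) =====
-- stated objective: alternative
-- what changed: A fuses space tracking into a single forward enumerate loop; B first computes the plain common-prefix length in one loop, then resolves the word boundary separately with a backward scan for the last whitespace, slicing the original string.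
import Mathlib
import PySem

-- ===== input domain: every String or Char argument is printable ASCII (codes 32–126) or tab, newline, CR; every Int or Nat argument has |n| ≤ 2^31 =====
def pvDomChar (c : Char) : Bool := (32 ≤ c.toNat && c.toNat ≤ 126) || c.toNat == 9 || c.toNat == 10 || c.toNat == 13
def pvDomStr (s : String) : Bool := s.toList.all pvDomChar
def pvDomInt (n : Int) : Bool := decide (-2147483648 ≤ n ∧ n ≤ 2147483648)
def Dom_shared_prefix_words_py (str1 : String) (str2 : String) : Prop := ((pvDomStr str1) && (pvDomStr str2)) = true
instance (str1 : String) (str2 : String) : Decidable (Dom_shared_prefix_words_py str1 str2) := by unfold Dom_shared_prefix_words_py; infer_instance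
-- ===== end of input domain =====

-- B resolves the word boundary in a separate backward scan instead of A's fused forward space tracking; same cost, different decomposition.

-- ===== PORT A =====
-- A's enumerate loop over s1 with the running space_idx; `b.getD i ' '` models
-- s2[i], which is provably in range whenever evaluated (s1 = min ≤ s2 lexicographically),
-- so the default is never used and the port is exact.
def pvAgo (a b : List Char) (i spaceIdx : Nat) : List Char :=
  if h : i < a.length then
    let c := a[i]
    let sp := if PySem.Chars.isspace c then i else spaceIdx
    if c ≠ b.getD i ' ' then PySem.Chars.rstrip (a.take sp)
    else pvAgo a b (i + 1) sp
  else
    if a = b ∨ PySem.Chars.isspace (b.getD a.length ' ') = true then PySem.Chars.rstrip a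
    else PySem.Chars.rstrip (a.take spaceIdx)
termination_by a.length - i

def shared_prefix_words_py (str1 : String) (str2 : String) : String :=
  let s1 := if str1 ≤ str2 then str1 else str2   -- min(str1, str2)
  let s2 := if str1 ≤ str2 then str2 else str1   -- max(str1, str2)
  String.ofList (pvAgo s1.toList s2.toList 0 0)

-- ===== PORT B =====
-- phase 1: longest common character prefix length (Source B's first while loop)
def pvBn (a b : List Char) (n : Nat) : Nat :=
  if h : n < a.length ∧ n < b.length ∧ a.getD n ' ' = b.getD n ' ' then pvBn a b (n + 1)
  else n
termination_by a.length - n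
decreasing_by omega

-- phase 2 backward scan: Source B's `while k > 0 and not a[k-1].isspace(): k -= 1`
def pvBk (a : List Char) : Nat → Nat
  | 0 => 0
  | k + 1 => if PySem.Chars.isspace (a.getD k ' ') then k + 1 else pvBk a k

def shared_prefix_words_py_alt (str1 : String) (str2 : String) : String :=
  let a := if str1 ≤ str2 then str1 else str2
  let b := if str1 ≤ str2 then str2 else str1
  let al := a.toList
  let bl := b.toList
  let n := pvBn al bl 0
  if n = al.length ∧ (n = bl.length ∨ PySem.Chars.isspace (bl.getD n ' ') = true) then
    String.ofList (PySem.Chars.rstrip al)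
  else
    let k := pvBk al (min (n + 1) al.length)
    if 0 < k then String.ofList (PySem.Chars.rstrip (al.take (k - 1))) else ""

-- ===== PRECONDITION & SPEC =====
def Spec_shared_prefix_words_py (str1 : String) (str2 : String) (out : String) : Prop := out = shared_prefix_words_py_alt str1 str2
instance (str1 : String) (str2 : String) (out : String) : Decidable (Spec_shared_prefix_words_py str1 str2 out) := by unfold Spec_shared_prefix_words_py; infer_instance

-- ===== CLAIM (what is proved, stated in full; the proofs are below) =====
def Claim_equal_shared_prefix_words_py : Prop := ∀ (str1 : String) (str2 : String), Dom_shared_prefix_words_py str1 str2 → Spec_shared_prefix_words_py str1 str2 (shared_prefix_words_py str1 str2)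

-- ===== LEMMAS AND PROOFS =====

-- a proper prefix is lexicographically smaller
lemma pv_prefix_lex (x : List Char) : ∀ y : List Char, y ≠ [] → List.Lex (· < ·) x (x ++ y) := by
  induction x with
  | nil => intro y hy; cases y with
    | nil => exact absurd rfl hy
    | cons c t => exact List.Lex.nil
  | cons c t ih => intro y hy; exact List.Lex.cons (ih y hy)

lemma pvBn_shift (a b : List Char) (i : Nat) (hia : i ≤ a.length) (hib : i ≤ b.length)
    (hpre : ∀ j, j < i → a.getD j ' ' = b.getD j ' ') :
    pvBn a b 0 = pvBn a b i := by
  induction i with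
  | zero => rfl
  | succ m ih =>
    have h0 : pvBn a b 0 = pvBn a b m := ih (by omega) (by omega) (fun j hj => hpre j (by omega))
    rw [h0, pvBn]
    have : m < a.length ∧ m < b.length ∧ a.getD m ' ' = b.getD m ' ' :=
      ⟨by omega, by omega, hpre m (by omega)⟩
    rw [dif_pos this]

lemma pvBn_stop (a b : List Char) (i : Nat)
    (h : ¬ (i < a.length ∧ i < b.length ∧ a.getD i ' ' = b.getD i ' ')) :
    pvBn a b i = i := by
  rw [pvBn, dif_neg h]

-- the unified "mismatch / no-word-boundary" result of B equals A's take-spaceIdx result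
lemma pv_tail_eq (a : List Char) (m : Nat) :
    String.ofList (PySem.Chars.rstrip (a.take (pvBk a m - 1))) =
      (if 0 < pvBk a m then String.ofList (PySem.Chars.rstrip (a.take (pvBk a m - 1))) else "") := by
  by_cases hk : 0 < pvBk a m
  · simp [hk]
  · have hk0 : pvBk a m = 0 := by omega
    simp [hk0, PySem.Chars.rstrip]

-- if b matches a on its whole length and is shorter, b is a proper prefix, hence lexicographically below a
lemma pv_b_prefix (a b : List Char) (hlt : b.length < a.length)
    (hpre : ∀ j, j < b.length → a.getD j ' ' = b.getD j ' ') : List.Lex (· < ·) b a := by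
  have hb : b = a.take b.length := by
    apply List.ext_getElem
    · simp [Nat.min_eq_left (le_of_lt hlt)]
    · intro j h1 h2
      have h3 := hpre j h1
      rw [List.getD_eq_getElem a ' ' (by omega), List.getD_eq_getElem b ' ' h1] at h3
      simp [h3]
  have ha : a = b ++ a.drop b.length := by
    nth_rewrite 1 [← List.take_append_drop b.length a]
    rw [← hb]
  have hd : a.drop b.length ≠ [] := by
    intro h
    have := congrArg List.length h
    simp at this
    omega
  have := pv_prefix_lex b (a.drop b.length) hd
  rwa [← ha] at this

def pvBres (a : List Char) (n : Nat) (bd : Char) (blen : Nat) : String :=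
  if n = a.length ∧ (n = blen ∨ PySem.Chars.isspace bd = true) then
    String.ofList (PySem.Chars.rstrip a)
  else
    let k := pvBk a (min (n + 1) a.length)
    if 0 < k then String.ofList (PySem.Chars.rstrip (a.take (k - 1))) else ""

-- the loop-exit case of A (i = a.length) agrees with B's two-phase result
lemma pv_exit (a b : List Char) (spaceIdx : Nat) (hib : a.length ≤ b.length)
    (hpre : ∀ j, j < a.length → a.getD j ' ' = b.getD j ' ')
    (hsp : spaceIdx = pvBk a a.length - 1) :
    String.ofList (pvAgo a b a.length spaceIdx) =
      pvBres a (pvBn a b 0) (b.getD (pvBn a b 0) ' ') b.length := by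
  have hn : pvBn a b 0 = a.length := by
    rw [pvBn_shift a b a.length le_rfl hib hpre]
    apply pvBn_stop
    simp
  rw [pvAgo, dif_neg (lt_irrefl a.length), hn]
  unfold pvBres
  by_cases heq : a.length = b.length
  · have hAB : a = b := by
      apply List.ext_getElem heq
      intro j h1 h2
      have h3 := hpre j h1
      rw [List.getD_eq_getElem a ' ' h1, List.getD_eq_getElem b ' ' h2] at h3
      exact h3
    have hcL : a = b ∨ PySem.Chars.isspace (b.getD a.length ' ') = true := Or.inl hAB
    have hcR : a.length = a.length ∧ (a.length = b.length ∨ PySem.Chars.isspace (b.getD a.length ' ') = true) := ⟨rfl, Or.inl heq⟩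
    rw [if_pos hcL, if_pos hcR]
  · by_cases hspace : PySem.Chars.isspace (b.getD a.length ' ') = true
    · have hcL : a = b ∨ PySem.Chars.isspace (b.getD a.length ' ') = true := Or.inr hspace
      have hcR : a.length = a.length ∧ (a.length = b.length ∨ PySem.Chars.isspace (b.getD a.length ' ') = true) := ⟨rfl, Or.inr hspace⟩
      rw [if_pos hcL, if_pos hcR]
    · have hANB : a ≠ b := fun h => heq (by rw [h])
      have hcL : ¬ (a = b ∨ PySem.Chars.isspace (b.getD a.length ' ') = true) := fun h => h.elim hANB hspace
      have hcR : ¬ (a.length = a.length ∧ (a.length = b.length ∨ PySem.Chars.isspace (b.getD a.length ' ') = true)) := fun h => h.2.elim heq hspace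
      rw [if_neg hcL, if_neg hcR, Nat.min_eq_right (by omega), hsp]
      exact pv_tail_eq a a.length

lemma pv_main (a b : List Char) (hab : ¬ List.Lex (· < ·) b a) :
    ∀ d i spaceIdx, a.length - i ≤ d → i ≤ a.length → i ≤ b.length →
    (∀ j, j < i → a.getD j ' ' = b.getD j ' ') →
    spaceIdx = pvBk a i - 1 →
    String.ofList (pvAgo a b i spaceIdx) =
      pvBres a (pvBn a b 0) (b.getD (pvBn a b 0) ' ') b.length := by
  intro d
  induction d with
  | zero =>
    intro i spaceIdx hd hia hib hpre hsp
    have hi : i = a.length := by omega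
    subst hi
    exact pv_exit a b spaceIdx hib hpre hsp
  | succ d ih =>
    intro i spaceIdx hd hia hib hpre hsp
    by_cases hlt : i < a.length
    · -- loop body
      by_cases hib' : i < b.length
      · have hag : a.getD i ' ' = a[i] := List.getD_eq_getElem a ' ' hlt
        have hbg : b.getD i ' ' = b[i] := List.getD_eq_getElem b ' ' hib'
        have hsp' : (if PySem.Chars.isspace a[i] then i else spaceIdx) = pvBk a (i + 1) - 1 := by
          rw [pvBk, hag]
          by_cases hs : PySem.Chars.isspace a[i] = true
          · simp [hs]
          · simp [hs, hsp]
        rw [pvAgo, dif_pos hlt]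
        dsimp only
        by_cases hmis : a[i] = b.getD i ' '
        · -- characters match: A continues, and pvBn also steps past i
          have hcond : ¬ (a[i] ≠ b.getD i ' ') := not_not_intro hmis
          rw [if_neg hcond, hsp']
          exact ih (i + 1) _ (by omega) (by omega) (by omega)
            (fun j hj => by
              rcases Nat.lt_succ_iff_lt_or_eq.mp hj with h | h
              · exact hpre j h
              · subst h; rw [hag]; exact hmis)
            rfl
        · -- first mismatch at i: n = i
          have hcond : a[i] ≠ b.getD i ' ' := hmis
          rw [if_pos hcond, hsp']
          have hn : pvBn a b 0 = i := by
            rw [pvBn_shift a b i (le_of_lt hlt) (le_of_lt hib') hpre]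
            apply pvBn_stop
            rintro ⟨-, -, hEq⟩
            rw [hag] at hEq
            exact hmis hEq
          unfold pvBres
          have hcR : ¬ (i = a.length ∧ (i = b.length ∨ PySem.Chars.isspace (b.getD i ' ') = true)) :=
            fun h => Nat.ne_of_lt hlt h.1
          rw [hn, if_neg hcR, Nat.min_eq_left (by omega)]
          exact pv_tail_eq a (i + 1)
      · -- i = b.length < a.length: impossible, b would be a proper prefix of a = min ≤ b
        exact absurd (pv_b_prefix a b (by omega) (fun j hj => hpre j (by omega))) hab
    · have hi : i = a.length := by omega
      subst hi
      exact pv_exit a b spaceIdx hib hpre hsp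

lemma pv_order (s t : String) (h : s ≤ t) : ¬ List.Lex (· < ·) t.toList s.toList := by
  have h2 : ¬ t < s := not_lt.mpr h
  intro hl
  apply h2
  rw [String.lt_iff_toList_lt]
  exact hl

-- ===== VERDICT (by name: the statement is the Claim_ definition above) =====
theorem shared_prefix_words_py_spec : Claim_equal_shared_prefix_words_py := by
  intro str1 str2 _
  unfold Spec_shared_prefix_words_py shared_prefix_words_py shared_prefix_words_py_alt
  by_cases hle : str1 ≤ str2
  · simp only [hle, if_true]
    exact pv_main str1.toList str2.toList (pv_order str1 str2 hle)
      str1.toList.length 0 0 (by omega) (by omega) (by omega) (by omega) rfl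
  · simp only [hle, if_false]
    exact pv_main str2.toList str1.toList (pv_order str2 str1 (le_of_lt (not_le.mp hle)))
      str2.toList.length 0 0 (by omega) (by omega) (by omega) (by omega) rfl
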